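-- pv_equiv track=rewrite | github.com/BastiLd/kartenbot | services/battle.py | _keep_last_rounds
-- ===== SOURCE A (Python) =====
-- def _keep_last_rounds(text: str, max_rounds: int | None) -> str:
--     if max_rounds is None:
--         return text
--     max_rounds = max(1, int(max_rounds))
--     parts = text.split("\n\n**Runde ")
--     if len(parts) <= 1:
--         return text
--     header = parts[0]
--     rounds = parts[1:]
--     kept = rounds[-max_rounds:]
--     rebuilt = header + "".join("\n\n**Runde " + part for part in kept)
--     return rebuilt
-- ===== SOURCE B (Python) =====
-- def _keep_last_rounds(text: str, max_rounds: int | None) -> str: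
--     if max_rounds is None:
--         return text
--     n = max(1, int(max_rounds))
--     delim = "\n\n**Runde "
--     c = text.count(delim)
--     if c <= n:
--         return text
--     header = text.split(delim, 1)[0]
--     tail = text.split(delim, c - n + 1)[-1]
--     return header + delim + tail
-- ===== Notes on version B (the rewrite author's own statement) =====
-- stated objective: alternative
-- what changed: A splits the whole text into a parts list, slices off the last N rounds and re-joins them piece by piece; B never materializes the parts list: it counts the delimiter occurrences, returns the text unchanged when count <= N, and otherwise extracts the header and the kept suffix with two maxsplit-bounded splits and a single concatenation.
import Mathlib
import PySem

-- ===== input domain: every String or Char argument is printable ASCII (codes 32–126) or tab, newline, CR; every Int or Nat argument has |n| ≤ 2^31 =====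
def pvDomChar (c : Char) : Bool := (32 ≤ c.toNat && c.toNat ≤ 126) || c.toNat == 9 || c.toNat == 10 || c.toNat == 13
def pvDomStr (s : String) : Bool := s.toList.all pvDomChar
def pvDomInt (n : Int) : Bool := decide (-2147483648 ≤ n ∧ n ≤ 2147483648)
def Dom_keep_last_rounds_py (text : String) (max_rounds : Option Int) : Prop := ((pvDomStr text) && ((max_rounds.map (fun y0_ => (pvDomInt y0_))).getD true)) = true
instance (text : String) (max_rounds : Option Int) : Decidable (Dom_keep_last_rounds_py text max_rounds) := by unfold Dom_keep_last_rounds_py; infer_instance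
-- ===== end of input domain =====

-- B replaces A's full split / slice / re-join of the parts list by counting the delimiter
-- occurrences and extracting the header and the kept suffix with two bounded splits and one
-- concatenation (objective: alternative decomposition, no parts list, no join loop).

-- the round delimiter, shared data constant of both ports
def pyDelim : String := "\n\n**Runde "

-- ===== PORT A =====
def keep_last_rounds_py (text : String) (max_rounds : Option Int) : String :=
  match max_rounds with
  | none => text
  | some mr =>
    let n : Int := max 1 mr
    let parts : List String := (PySem.Str.split? text pyDelim).getD []
    if parts.length ≤ 1 then text
    else
      let header : String := (PySem.List.pyGet? parts 0).getD ""
      let rounds : List String := PySem.List.slice parts (some 1) none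
      let kept : List String := PySem.List.slice rounds (some (-n)) none
      header ++ PySem.Str.join "" (kept.map (fun part => pyDelim ++ part))

-- ===== PORT B =====
def keep_last_rounds_py_alt (text : String) (max_rounds : Option Int) : String :=
  match max_rounds with
  | none => text
  | some mr =>
    let n : Int := max 1 mr
    let c : Int := (PySem.Str.count text pyDelim : Int)
    if c ≤ n then text
    else
      let header : String := (PySem.List.pyGet? ((PySem.Str.splitMax? text pyDelim 1).getD []) 0).getD ""
      let tail : String := (PySem.List.pyGet? ((PySem.Str.splitMax? text pyDelim (c - n + 1)).getD []) (-1)).getD ""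
      header ++ pyDelim ++ tail

-- ===== PRECONDITION & SPEC =====
def Spec_keep_last_rounds_py (text : String) (max_rounds : Option Int) (out : String) : Prop := out = keep_last_rounds_py_alt text max_rounds
instance (text : String) (max_rounds : Option Int) (out : String) : Decidable (Spec_keep_last_rounds_py text max_rounds out) := by unfold Spec_keep_last_rounds_py; infer_instance

-- ===== CLAIM (what is proved, stated in full; the proofs are below) =====
def Claim_equal_keep_last_rounds_py : Prop := ∀ (text : String) (max_rounds : Option Int), Dom_keep_last_rounds_py text max_rounds → Spec_keep_last_rounds_py text max_rounds (keep_last_rounds_py text max_rounds)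

-- ===== LEMMAS AND PROOFS =====

-- the delimiter on the character-list side
def pvD : List Char := pyDelim.toList

theorem pvD_length : pvD.length = 10 := by decide

def msplit : List Char → List (List Char)
  | [] => [[]]
  | c :: rest =>
    if pvD.isPrefixOf (c :: rest) then [] :: msplit ((c :: rest).drop pvD.length)
    else (msplit rest).modifyHead (c :: ·)
termination_by l => l.length
decreasing_by
  · simp only [List.length_drop, List.length_cons]
    have h10 : pvD.length = 10 := pvD_length
    omega
  · simp

theorem msplit_ne_nil (l : List Char) : msplit l ≠ [] := by
  induction l using msplit.induct with
  | case1 => simp [msplit]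
  | case2 c rest h ih => simp [msplit, h]
  | case3 c rest h ih =>
    rcases hm : msplit rest with _ | ⟨a, t⟩
    · exact absurd hm ih
    · simp [msplit, h, hm]

theorem splitOn_go_eq (fuel : Nat) : ∀ (l cur : List Char) (acc : List (List Char)),
    l.length < fuel →
    PySem.Chars.splitOn.go pvD fuel l cur acc = acc.reverse ++ (msplit l).modifyHead (cur.reverse ++ ·) := by
  induction fuel with
  | zero => intro l cur acc h; omega
  | succ fuel ih =>
    intro l cur acc h
    cases l with
    | nil => simp [PySem.Chars.splitOn.go, msplit]
    | cons c rest =>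
      by_cases hp : pvD.isPrefixOf (c :: rest)
      · rw [PySem.Chars.splitOn.go]
        simp only [hp, if_true]
        have hlen : (List.drop pvD.length (c :: rest)).length < fuel := by
          have h10 := pvD_length
          simp only [List.length_cons] at h
          simp only [List.length_drop, List.length_cons]
          omega
        rw [ih _ _ _ hlen]
        rw [msplit]
        simp [hp]
        exact congrFun List.modifyHead_id _
      · rw [PySem.Chars.splitOn.go]
        simp only [hp]
        have hlen : rest.length < fuel := by
          simp only [List.length_cons] at h; omega
        rw [ih _ _ _ hlen]
        rw [msplit]
        simp only [hp]
        rcases hm : msplit rest with _ | ⟨a, t⟩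
        · exact absurd hm (msplit_ne_nil rest)
        · simp

def msplitN : Nat → List Char → List (List Char)
  | _, [] => [[]]
  | m, c :: rest =>
    if m = 0 then [c :: rest]
    else if pvD.isPrefixOf (c :: rest) then [] :: msplitN (m - 1) ((c :: rest).drop pvD.length)
    else (msplitN m rest).modifyHead (c :: ·)
termination_by _ l => l.length
decreasing_by
  · simp only [List.length_drop, List.length_cons]
    have h10 : pvD.length = 10 := pvD_length
    omega
  · simp

def ccount : List Char → Nat
  | [] => 0
  | c :: rest =>
    if pvD.isPrefixOf (c :: rest) then ccount ((c :: rest).drop pvD.length) + 1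
    else ccount rest
termination_by l => l.length
decreasing_by
  · simp only [List.length_drop, List.length_cons]
    have h10 : pvD.length = 10 := pvD_length
    omega
  · simp

theorem msplitN_ne_nil (m : Nat) (l : List Char) : msplitN m l ≠ [] := by
  induction l generalizing m with
  | nil => simp [msplitN]
  | cons c rest ih =>
    rw [msplitN]
    split
    · simp
    · split
      · simp
      · rcases hm : msplitN m rest with _ | ⟨a, t⟩
        · exact absurd hm (ih m)
        · simp

theorem splitOnMax_go_eq (fuel : Nat) : ∀ (m : Nat) (l cur : List Char) (acc : List (List Char)),
    l.length < fuel →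
    PySem.Chars.splitOnMax.go pvD fuel m l cur acc = acc.reverse ++ (msplitN m l).modifyHead (cur.reverse ++ ·) := by
  induction fuel with
  | zero => intro m l cur acc h; omega
  | succ fuel ih =>
    intro m l cur acc h
    cases l with
    | nil => simp [PySem.Chars.splitOnMax.go, msplitN]
    | cons c rest =>
      by_cases h0 : m = 0
      · rw [PySem.Chars.splitOnMax.go]
        simp [h0, msplitN]
      · by_cases hp : pvD.isPrefixOf (c :: rest)
        · rw [PySem.Chars.splitOnMax.go]
          simp only [h0, if_false, hp, if_true]
          have hlen : (List.drop pvD.length (c :: rest)).length < fuel := by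
            have h10 := pvD_length
            simp only [List.length_cons] at h
            simp only [List.length_drop, List.length_cons]
            omega
          rw [ih _ _ _ _ hlen]
          rw [msplitN]
          simp [h0, hp]
          exact congrFun List.modifyHead_id _
        · rw [PySem.Chars.splitOnMax.go]
          simp only [h0, if_false, hp]
          have hlen : rest.length < fuel := by
            simp only [List.length_cons] at h; omega
          rw [ih _ _ _ _ hlen]
          rw [msplitN]
          simp only [h0, if_false, hp]
          rcases hm : msplitN m rest with _ | ⟨a, t⟩
          · exact absurd hm (msplitN_ne_nil m rest)
          · simp

theorem count_go_eq (fuel : Nat) : ∀ (l : List Char) (acc : Nat),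
    l.length ≤ fuel →
    PySem.Chars.count.go pvD fuel l acc = acc + ccount l := by
  induction fuel with
  | zero =>
    intro l acc h
    have : l = [] := List.length_eq_zero_iff.mp (by omega)
    subst this
    simp [PySem.Chars.count.go, ccount]
  | succ fuel ih =>
    intro l acc h
    cases l with
    | nil => simp [PySem.Chars.count.go, ccount]
    | cons c rest =>
      by_cases hp : pvD.isPrefixOf (c :: rest)
      · rw [PySem.Chars.count.go]
        simp only [hp, if_true]
        have hlen : (List.drop pvD.length (c :: rest)).length ≤ fuel := by
          have h10 := pvD_length
          simp only [List.length_cons] at h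
          simp only [List.length_drop, List.length_cons]
          omega
        rw [ih _ _ hlen]
        rw [ccount]
        simp only [hp, if_true]
        omega
      · rw [PySem.Chars.count.go]
        simp only [hp]
        have hlen : rest.length ≤ fuel := by
          simp only [List.length_cons] at h; omega
        rw [ih _ _ hlen]
        rw [ccount]
        simp [hp]

theorem splitOn_eq_msplit (l : List Char) : PySem.Chars.splitOn l pvD = msplit l := by
  rw [PySem.Chars.splitOn, splitOn_go_eq (l.length + 1) l [] [] (by omega)]
  simp
  exact congrFun List.modifyHead_id _

theorem splitOnMax_eq_msplitN (l : List Char) (M : Int) (hM : 0 ≤ M) :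
    PySem.Chars.splitOnMax l pvD M = msplitN M.toNat l := by
  rw [PySem.Chars.splitOnMax]
  rw [if_neg (by omega)]
  rw [splitOnMax_go_eq (l.length + 1) M.toNat l [] [] (by omega)]
  simp
  exact congrFun List.modifyHead_id _

theorem count_eq_ccount (l : List Char) : PySem.Chars.count l pvD = ccount l := by
  rw [PySem.Chars.count]
  rw [if_neg (by decide)]
  rw [count_go_eq l.length l 0 (by omega)]
  omega

theorem prefix_append_drop (l : List Char) (h : pvD.isPrefixOf l = true) :
    pvD ++ l.drop pvD.length = l :=
  List.prefix_iff_eq_append.mp ((PySem.Chars.startswith_iff l pvD).mp h)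

theorem msplit_length (l : List Char) : (msplit l).length = ccount l + 1 := by
  induction l using msplit.induct with
  | case1 => simp [msplit, ccount]
  | case2 c rest hp ih => rw [msplit, ccount]; simp [hp, ih]
  | case3 c rest hp ih => rw [msplit, ccount]; simp [hp, ih]

theorem msplit_rejoin (l : List Char) :
    (msplit l).headI ++ ((msplit l).tail.map (pvD ++ ·)).flatten = l := by
  induction l using msplit.induct with
  | case1 => simp [msplit]
  | case2 c rest hp ih =>
    rw [msplit, if_pos hp]
    rcases hm : msplit ((c :: rest).drop pvD.length) with _ | ⟨h', t'⟩
    · exact absurd hm (msplit_ne_nil _)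
    · rw [hm] at ih
      simp only [List.headI, List.tail, List.map_cons, List.flatten_cons] at ih ⊢
      rw [List.nil_append, List.append_assoc, ih]
      exact prefix_append_drop _ hp
  | case3 c rest hp ih =>
    rw [msplit, if_neg hp]
    rcases hm : msplit rest with _ | ⟨h', t'⟩
    · exact absurd hm (msplit_ne_nil _)
    · rw [hm] at ih
      simp only [List.modifyHead_cons, List.headI, List.tail] at ih ⊢
      rw [List.cons_append, ih]

theorem msplit_flatten (l : List Char) :
    ((msplit l).map (pvD ++ ·)).flatten = pvD ++ l := by
  rcases hm : msplit l with _ | ⟨h, t⟩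
  · exact absurd hm (msplit_ne_nil _)
  · have := msplit_rejoin l
    rw [hm] at this
    simp only [List.headI, List.tail] at this
    simp only [List.map_cons, List.flatten_cons, List.append_assoc, this]

theorem msplitN_headI (m : Nat) (l : List Char) (hm : 1 ≤ m) :
    (msplitN m l).headI = (msplit l).headI := by
  induction l generalizing m with
  | nil => simp [msplitN, msplit]
  | cons c rest ih =>
    have h0 : ¬ m = 0 := by omega
    rw [msplitN, if_neg h0, msplit]
    by_cases hp : pvD.isPrefixOf (c :: rest)
    · simp [hp]
    · rw [if_neg hp, if_neg hp]
      rcases hmn : msplitN m rest with _ | ⟨a, t⟩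
      · exact absurd hmn (msplitN_ne_nil _ _)
      · rcases hms : msplit rest with _ | ⟨b, s⟩
        · exact absurd hms (msplit_ne_nil _)
        · have := ih m hm
          rw [hmn, hms] at this
          simp only [List.headI] at this
          simp [this]

theorem msplitN_length (m : Nat) (l : List Char) : (msplitN m l).length = min m (ccount l) + 1 := by
  induction m, l using msplitN.induct with
  | case1 x => simp [msplitN, ccount]
  | case2 c rest => simp [msplitN]
  | case3 m c rest h0 hp ih =>
    rw [msplitN, if_neg h0, if_pos hp, ccount, if_pos hp]
    simp only [List.length_cons, ih]
    omega
  | case4 m c rest h0 hp ih =>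
    rw [msplitN, if_neg h0, if_neg hp, ccount, if_neg hp]
    simp [ih]

theorem drop_modifyHead {α : Type} (f : α → α) (xs : List α) (m : Nat) (hm : 1 ≤ m) :
    (xs.modifyHead f).drop m = xs.drop m := by
  cases xs with
  | nil => simp
  | cons a t =>
    obtain ⟨k, rfl⟩ : ∃ k, m = k + 1 := ⟨m - 1, by omega⟩
    simp [List.drop_succ_cons]

theorem getLastD_modifyHead {α : Type} (f : α → α) (xs : List α) (d : α) (hx : 2 ≤ xs.length) :
    (xs.modifyHead f).getLastD d = xs.getLastD d := by
  cases xs with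
  | nil => simp at hx
  | cons a t =>
    cases t with
    | nil => simp at hx
    | cons b s => simp

theorem msplitN_zero_getLastD (l : List Char) : (msplitN 0 l).getLastD [] = l := by
  cases l <;> simp [msplitN]

theorem msplitN_getLast (m : Nat) (l : List Char) :
    1 ≤ m → m ≤ ccount l →
    pvD ++ (msplitN m l).getLastD [] = (((msplit l).drop m).map (pvD ++ ·)).flatten := by
  induction m, l using msplitN.induct with
  | case1 x => intro _ hc; rw [ccount] at hc; omega
  | case2 c rest => intro hm _; omega
  | case3 m c rest h0 hp ih =>
    intro hm hc
    rw [ccount, if_pos hp] at hc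
    rw [msplitN, if_neg h0, if_pos hp, msplit, if_pos hp]
    obtain ⟨k, rfl⟩ : ∃ k, m = k + 1 := ⟨m - 1, by omega⟩
    rw [List.getLastD_cons, List.drop_succ_cons]
    simp only [Nat.add_sub_cancel] at ih ⊢
    by_cases h1 : k = 0
    · subst h1
      rw [msplitN_zero_getLastD, List.drop_zero, msplit_flatten]
    · exact ih (by omega) (by omega)
  | case4 m c rest h0 hp ih =>
    intro hm hc
    rw [ccount, if_neg hp] at hc
    rw [msplitN, if_neg h0, if_neg hp, msplit, if_neg hp]
    rw [drop_modifyHead _ _ _ hm]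
    rw [getLastD_modifyHead _ _ _ (by rw [msplitN_length]; omega)]
    exact ih hm hc

theorem pyGet?_zero {α : Type} (x : α) (t : List α) : PySem.List.pyGet? (x :: t) 0 = some x := by
  simp [PySem.List.pyGet?, PySem.List.pyIdx?]

theorem pyGet?_neg_one {α : Type} (xs : List α) (h : xs ≠ []) :
    PySem.List.pyGet? xs (-1) = xs.getLast? := by
  have hl : 1 ≤ xs.length := by
    cases xs with
    | nil => exact absurd rfl h
    | cons a t => simp
  rw [PySem.List.pyGet?, PySem.List.pyIdx?]
  rw [if_neg (by omega), if_pos (by omega)]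
  rw [List.getLast?_eq_getElem?]
  simp

theorem slice_neg_from {α : Type} (xs : List α) (n : Int) (hn : 1 ≤ n) :
    PySem.List.slice xs (some (-n)) none = xs.drop (xs.length - n.toNat) := by
  rw [PySem.List.slice, PySem.List.clampIdx]
  rw [if_pos (by omega)]
  by_cases hlt : (xs.length : Int) + -n < 0
  · rw [if_pos hlt]
    have h1 : xs.length - n.toNat = 0 := by omega
    rw [h1, List.drop_zero]
    exact List.take_of_length_le (by omega)
  · rw [if_neg hlt]
    have h1 : ((xs.length : Int) + -n).toNat = xs.length - n.toNat := by omega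
    rw [h1]
    exact List.take_of_length_le (by simp)

theorem join_nil_flatten (ps : List (List Char)) : PySem.Chars.join [] ps = ps.flatten := by
  induction ps with
  | nil => simp [PySem.Chars.join_nil]
  | cons p ps ih =>
    cases ps with
    | nil => simp [PySem.Chars.join_singleton]
    | cons q rs =>
      rw [PySem.Chars.join_cons_cons, List.flatten_cons, ih]
      simp

theorem split?_some (text : String) :
    ∃ ps, PySem.Str.split? text pyDelim = some ps ∧ ps.map String.toList = msplit text.toList := by
  have h := PySem.Str.split?_map text pyDelim
  rw [PySem.Chars.split?, if_neg (by decide)] at h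
  rw [show pyDelim.toList = pvD from rfl, splitOn_eq_msplit] at h
  cases hsp : PySem.Str.split? text pyDelim with
  | none => rw [hsp] at h; simp at h
  | some ps =>
    rw [hsp] at h
    simp only [Option.map_some, Option.some.injEq] at h
    exact ⟨ps, rfl, h⟩

theorem splitMax?_some (text : String) (M : Int) (hM : 0 ≤ M) :
    ∃ ts, PySem.Str.splitMax? text pyDelim M = some ts ∧ ts.map String.toList = msplitN M.toNat text.toList := by
  have h := PySem.Str.splitMax?_map text pyDelim M
  rw [PySem.Chars.splitMax?, if_neg (by decide)] at h
  rw [show pyDelim.toList = pvD from rfl, splitOnMax_eq_msplitN _ _ hM] at h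
  cases hsp : PySem.Str.splitMax? text pyDelim M with
  | none => rw [hsp] at h; simp at h
  | some ts =>
    rw [hsp] at h
    simp only [Option.map_some, Option.some.injEq] at h
    exact ⟨ts, rfl, h⟩


theorem drop_one_cons {α : Type} (x : α) (t : List α) : List.drop (1:Int).toNat (x :: t) = t := by
  simp

-- ===== VERDICT (by name: the statement is the Claim_ definition above) =====
theorem keep_last_rounds_py_spec : Claim_equal_keep_last_rounds_py := by
  intro text max_rounds _dom
  unfold Spec_keep_last_rounds_py
  cases max_rounds with
  | none => rfl
  | some mr =>
    simp only [keep_last_rounds_py, keep_last_rounds_py_alt]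
    have hn1 : (1:Int) ≤ max 1 mr := le_max_left 1 mr
    generalize hg : max (1:Int) mr = n at hn1 ⊢
    obtain ⟨ps, hps, hmap⟩ := split?_some text
    have hcnt : ((PySem.Str.count text pyDelim : Nat) : Int) = ((ccount text.toList : Nat) : Int) := by
      rw [PySem.Str.count_eq, show pyDelim.toList = pvD from rfl, count_eq_ccount]
    have hlen : ps.length = ccount text.toList + 1 := by
      have h := congrArg List.length hmap
      simpa [msplit_length] using h
    rw [hps]
    simp only [Option.getD_some]
    rw [hcnt]
    rcases ps with _ | ⟨p0, pt⟩
    · simp at hlen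
    · by_cases hk0 : ccount text.toList = 0
      · have c1 : (p0 :: pt).length ≤ 1 := by simp only [List.length_cons] at hlen ⊢; omega
        have c2 : ((ccount text.toList : Nat) : Int) ≤ n := by omega
        rw [if_pos c1, if_pos c2]
      · have c1 : ¬ (p0 :: pt).length ≤ 1 := by simp only [List.length_cons] at hlen ⊢; omega
        rw [if_neg c1]
        have hpt : pt.length = ccount text.toList := by simp at hlen; omega
        have htail : (msplit text.toList).tail = pt.map String.toList := by
          rw [← hmap]; simp
        have hhead : (msplit text.toList).headI = p0.toList := by
          rw [← hmap]; simp
        have hXlist :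
            ((PySem.List.pyGet? (p0 :: pt) 0).getD "" ++
              PySem.Str.join "" ((PySem.List.slice (PySem.List.slice (p0 :: pt) (some 1) none) (some (-n)) none).map
                (fun part => pyDelim ++ part))).toList
            = (msplit text.toList).headI ++
              ((((msplit text.toList).tail.drop (pt.length - n.toNat)).map (pvD ++ ·)).flatten) := by
          rw [pyGet?_zero, Option.getD_some]
          rw [PySem.List.slice_from _ (by norm_num : (0:Int) ≤ 1), drop_one_cons]
          rw [slice_neg_from _ _ hn1]
          rw [String.toList_append, PySem.Str.toList_join]
          rw [show ("" : String).toList = [] from rfl, join_nil_flatten]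
          rw [hhead, htail]
          congr 1
          rw [← List.map_drop]
          simp only [List.map_map]
          refine congrArg List.flatten (List.map_congr_left ?_)
          intro part _
          show (pyDelim ++ part).toList = pvD ++ part.toList
          rw [String.toList_append]
          rfl
        by_cases hkn : ((ccount text.toList : Nat) : Int) ≤ n
        · rw [if_pos hkn]
          apply String.toList_inj.mp
          rw [hXlist]
          have hj : pt.length - n.toNat = 0 := by omega
          rw [hj, List.drop_zero]
          exact msplit_rejoin text.toList
        · rw [if_neg hkn]
          apply String.toList_inj.mp
          rw [hXlist]
          obtain ⟨hs, hhs, hhmap⟩ := splitMax?_some text 1 (by norm_num)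
          obtain ⟨ts, hts, htmap⟩ := splitMax?_some text (((ccount text.toList : Nat) : Int) - n + 1) (by omega)
          rw [hhs, hts]
          simp only [Option.getD_some]
          rcases hs with _ | ⟨h0, ht⟩
          · exact absurd (by simpa using hhmap) (msplitN_ne_nil _ _)
          · rw [pyGet?_zero, Option.getD_some]
            have hts_ne : ts ≠ [] := by
              intro hnil
              rw [hnil] at htmap
              exact (msplitN_ne_nil _ _) (by simpa using htmap.symm)
            rw [pyGet?_neg_one _ hts_ne]
            obtain ⟨t0, ht0⟩ : ∃ v, ts.getLast? = some v := by
              cases hgl : ts.getLast? with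
              | none => exact absurd (List.getLast?_eq_none_iff.mp hgl) hts_ne
              | some v => exact ⟨v, rfl⟩
            rw [ht0]
            simp only [Option.getD_some]
            rw [String.toList_append, String.toList_append]
            have hh0 : h0.toList = (msplit text.toList).headI := by
              have h1 : (msplitN 1 text.toList).headI = h0.toList := by
                have := congrArg List.headI hhmap
                simp only [List.map_cons, List.headI] at this
                simpa using this.symm
              rw [← msplitN_headI 1 text.toList le_rfl, h1]
            set m' : Nat := (((ccount text.toList : Nat) : Int) - n + 1).toNat with hm'
            have ht0l : (msplitN m' text.toList).getLastD [] = t0.toList := by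
              rw [List.getLastD_eq_getLast?, ← htmap, List.getLast?_map, ht0]
              simp
            have hm'1 : 1 ≤ m' := by omega
            have hm'k : m' ≤ ccount text.toList := by omega
            have hkey := msplitN_getLast m' text.toList hm'1 hm'k
            rw [ht0l] at hkey
            rw [hh0, List.append_assoc]
            congr 1
            have hdrops : (msplit text.toList).tail.drop (pt.length - n.toNat)
                = (msplit text.toList).drop m' := by
              rw [← List.drop_one, List.drop_drop]
              congr 1
              omega
            rw [hdrops, ← hkey]
            rfl
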